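-- pv_equiv track=rewrite | github.com/rakesh-050791/DS-Algo | Advance/Queues/24-November-2022.py | solve
-- ===== SOURCE A (Python) =====
-- from collections import deque
-- from collections import deque
-- from collections import deque
-- from collections import deque
--
-- def solve(A):
--     input = [1, 2, 3]
--
--     myQueue = deque()
--     output = []
--
--     myQueue.append(1)
--     myQueue.append(2)
--     myQueue.append(3)
--
--     while A > 0:
--         element = myQueue.popleft() #Pops out the front of the queue
--
--         output.append(element)
--
--         for i in input:
--             myQueue.append(10*element + i)
--
--         A -= 1
--     return output
-- ===== SOURCE B (Python) =====
-- def solve(A):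
--     output = []
--     for k in range(1, A + 1):
--         # bijective base-3 digits of k (values 1..3), least-significant first
--         n = k
--         ds = []
--         while n > 0:
--             n -= 1
--             ds.append(n % 3 + 1)
--             n //= 3
--         v = 0
--         for d in reversed(ds):
--             v = v * 10 + d
--         output.append(v)
--     return output
-- ===== Notes on version B (the rewrite author's own statement) =====
-- stated objective: alternative
-- what changed: Replaces the BFS queue (deque with 3 children appended per pop) by a direct per-index closed form: the i-th term is computed independently via bijective base-3 digits of i folded into a decimal number; no queue and no cross-iteration state.
import Mathlib
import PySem

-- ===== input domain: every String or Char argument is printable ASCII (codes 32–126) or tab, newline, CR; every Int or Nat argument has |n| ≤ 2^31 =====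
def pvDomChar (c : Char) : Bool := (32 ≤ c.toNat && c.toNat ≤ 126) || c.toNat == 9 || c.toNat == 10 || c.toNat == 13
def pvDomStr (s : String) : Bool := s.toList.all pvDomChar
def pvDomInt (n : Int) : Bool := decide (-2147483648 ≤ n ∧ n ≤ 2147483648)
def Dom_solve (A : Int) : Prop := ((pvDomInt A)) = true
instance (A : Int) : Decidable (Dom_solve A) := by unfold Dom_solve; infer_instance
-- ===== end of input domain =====

-- B replaces A's BFS queue by an independent per-index bijective-base-3 closed form (objective: alternative).

-- ===== PORT A =====
-- the while loop: runs while A > 0, i.e. A.toNat times; popleft then append the three children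
def solveLoop : Nat → List Int → List Int → List Int
  | 0, _, out => out
  | _ + 1, [], out => out   -- unreachable: the queue starts with 3 elements and grows by 2 each pop
  | fuel + 1, e :: q, out =>
      solveLoop fuel (q ++ [10 * e + 1, 10 * e + 2, 10 * e + 3]) (out ++ [e])

def solve (A : Int) : List Int := solveLoop A.toNat [1, 2, 3] []

-- ===== PORT B =====
-- the inner while loop of Source B: bijective base-3 digits, least-significant first
def bijDigits (n : Nat) : List Int :=
  if h : n = 0 then [] else
    ((((n - 1) % 3 : Nat) : Int) + 1) :: bijDigits ((n - 1) / 3)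
decreasing_by
  exact Nat.lt_of_le_of_lt (Nat.div_le_self _ _) (Nat.sub_lt (Nat.pos_of_ne_zero h) Nat.one_pos)

-- one term: fold the digits most-significant first into a decimal value
def termAt (k : Int) : Int := (bijDigits k.toNat).reverse.foldl (fun v d => v * 10 + d) 0

def solve_alt (A : Int) : List Int := (PySem.List.pyRange 1 (A + 1) 1).map termAt

-- ===== PRECONDITION & SPEC =====
def Spec_solve (A : Int) (out : List Int) : Prop := out = solve_alt A
instance (A : Int) (out : List Int) : Decidable (Spec_solve A out) := by unfold Spec_solve; infer_instance

-- ===== CLAIM (what is proved, stated in full; the proofs are below) =====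
def Claim_equal_solve : Prop := ∀ (A : Int), Dom_solve A → Spec_solve A (solve A)

-- ===== LEMMAS AND PROOFS =====

def termN (k : Nat) : Int := (bijDigits k).reverse.foldl (fun v d => v * 10 + d) 0

theorem termAt_natCast (k : Nat) : termAt (k : Int) = termN k := by
  simp [termAt, termN]

theorem bijDigits_child (k i : Nat) (h1 : 1 ≤ i) (h2 : i ≤ 3) :
    bijDigits (3 * k + i) = ((i : Int)) :: bijDigits k := by
  rw [bijDigits]
  have hne : ¬ (3 * k + i = 0) := by omega
  simp only [hne, dite_false]
  have hm : 3 * k + i - 1 = 3 * k + (i - 1) := by omega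
  have hmod : (3 * k + (i - 1)) % 3 = i - 1 := by omega
  have hdiv : (3 * k + (i - 1)) / 3 = k := by omega
  rw [hm, hmod, hdiv]
  congr 1
  omega

theorem termN_child (k i : Nat) (h1 : 1 ≤ i) (h2 : i ≤ 3) :
    termN (3 * k + i) = 10 * termN k + i := by
  simp only [termN, bijDigits_child k i h1 h2, List.reverse_cons, List.foldl_append]
  simp only [List.foldl_cons, List.foldl_nil]
  ring

-- loop invariant: after popping terms 1..j the queue holds terms (j+1)..(3j+3)
theorem solveLoop_inv (fuel : Nat) : ∀ (j : Nat) (out : List Int),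
    solveLoop fuel ((List.range' (j + 1) (2 * j + 3)).map termN) out
      = out ++ (List.range' (j + 1) fuel).map termN := by
  induction fuel with
  | zero => intro j out; simp [solveLoop]
  | succ f ih =>
    intro j out
    have hq : (List.range' (j + 1) (2 * j + 3)).map termN
        = termN (j + 1) :: (List.range' (j + 2) (2 * j + 2)).map termN := by
      rw [List.range'_succ]; simp
    rw [hq]
    show solveLoop f _ _ = _
    have htail : (List.range' (j + 2) (2 * j + 2)).map termN
          ++ [10 * termN (j + 1) + 1, 10 * termN (j + 1) + 2, 10 * termN (j + 1) + 3]
        = (List.range' ((j + 1) + 1) (2 * (j + 1) + 3)).map termN := by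
      have h3 : 2 * (j + 1) + 3 = (2 * j + 2) + 3 := by ring
      have hsplit : List.range' (j + 2) (2 * j + 2 + 3) = List.range' (j + 2) (2 * j + 2) ++ List.range' (j + 2 + 1 * (2 * j + 2)) 3 := by
        rw [List.range'_append]
      rw [h3, hsplit, List.map_append]
      congr 1
      have hr : List.range' (j + 2 + 1 * (2 * j + 2)) 3
          = [3 * (j + 1) + 1, 3 * (j + 1) + 2, 3 * (j + 1) + 3] := by
        simp only [List.range'_succ, List.range'_zero, List.cons.injEq, and_true]
        omega
      rw [hr, List.map_cons, List.map_cons, List.map_cons, List.map_nil,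
        termN_child (j+1) 1 (by omega) (by omega),
        termN_child (j+1) 2 (by omega) (by omega),
        termN_child (j+1) 3 (by omega) (by omega)]
      norm_num
    rw [htail, ih (j + 1) (out ++ [termN (j + 1)])]
    rw [List.range'_succ, List.map_cons]
    simp

theorem solve_eq (A : Int) : solve A = (List.range' 1 A.toNat).map termN := by
  have h00 : termN 0 = 0 := by simp [termN, bijDigits]
  have t1 : termN 1 = 1 := by simpa [h00] using termN_child 0 1 (by omega) (by omega)
  have t2 : termN 2 = 2 := by simpa [h00] using termN_child 0 2 (by omega) (by omega)
  have t3 : termN 3 = 3 := by simpa [h00] using termN_child 0 3 (by omega) (by omega)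
  have h0 : ([1, 2, 3] : List Int) = (List.range' (0 + 1) (2 * 0 + 3)).map termN := by
    simp only [List.range', List.map_cons, List.map_nil]
    rw [t1]; norm_num [t2, t3]
  rw [solve, h0, solveLoop_inv A.toNat 0 []]
  simp

theorem solve_alt_eq (A : Int) : solve_alt A = (List.range' 1 A.toNat).map termN := by
  rw [solve_alt, PySem.List.pyRange_one]
  have h1 : A + 1 - 1 = A := by ring
  rw [h1, List.map_map, List.range'_eq_map_range, List.map_map]
  apply List.map_congr_left
  intro k _
  show termAt (1 + (k : Int)) = termN (1 + k)
  rw [show (1 : Int) + (k : Int) = ((1 + k : Nat) : Int) by push_cast; ring, termAt_natCast]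

-- ===== VERDICT (by name: the statement is the Claim_ definition above) =====
theorem solve_spec : Claim_equal_solve := by
  intro A _
  unfold Spec_solve
  rw [solve_eq, solve_alt_eq]
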